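-- pv_equiv track=rewrite | github.com/sanjana2523/github-projects | P5.py | method_name
-- ===== SOURCE A (Python) =====
-- def method_name(nums):
--     ret = [nums]
--     while len(nums) > 1:
--         if len(nums) == 2:
--             nums = [nums[0] + nums[1]]
--         elif len(nums) == 3:
--             nums = [nums[0] + nums[1] + nums[2]]
--         else:
--             nums = [nums[0] + nums[1]] + nums[2:-2] + [nums[-2] + nums[-1]]
--         ret.append(nums)
--     return ret
-- ===== SOURCE B (Python) =====
-- def method_name(nums):
--     # Closed-form stages from prefix sums of the ORIGINAL list; middles are slices, never recomputed.
--     n = len(nums)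
--     ret = [nums]
--     if n <= 1:
--         return ret
--     pre = [0]
--     for x in nums:
--         pre.append(pre[-1] + x)
--     total = pre[n]
--     for k in range(1, (n - 2) // 2 + 1):
--         ret.append([pre[k + 1]] + nums[k + 1 : n - k - 1] + [total - pre[n - k - 1]])
--     ret.append([total])
--     return ret
-- ===== Notes on version B (the rewrite author's own statement) =====
-- stated objective: alternative
-- what changed: Instead of iteratively rewriting the list stage by stage, B precomputes prefix sums once and emits every stage directly by a closed-form formula (prefix-sum endpoint, slice of the original list, suffix sum), appending the final [total] stage separately.
import Mathlib
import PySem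

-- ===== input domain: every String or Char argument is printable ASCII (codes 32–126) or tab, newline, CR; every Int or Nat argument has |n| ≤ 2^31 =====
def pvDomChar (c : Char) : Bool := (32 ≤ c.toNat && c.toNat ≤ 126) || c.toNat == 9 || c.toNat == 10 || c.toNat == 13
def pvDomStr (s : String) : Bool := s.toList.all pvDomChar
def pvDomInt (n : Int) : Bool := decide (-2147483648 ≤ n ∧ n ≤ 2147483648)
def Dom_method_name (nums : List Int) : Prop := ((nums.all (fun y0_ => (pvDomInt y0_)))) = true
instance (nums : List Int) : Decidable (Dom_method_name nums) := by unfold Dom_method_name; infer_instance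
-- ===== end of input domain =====

-- B replaces A's stage-by-stage list rewriting by a closed-form stage formula built from
-- prefix sums of the original list (alternative decomposition; same asymptotic cost).


-- ===== PORT A =====
-- nums[2:-2] on a list of length ≥ 4 (exact clamped-slice fact; used for the loop's termination)
theorem pvSlice2neg2 (xs : List Int) (h : 4 ≤ xs.length) :
    PySem.List.slice xs (some 2) (some (-2)) = (xs.drop 2).take (xs.length - 4) := by
  simp [PySem.List.slice, PySem.List.clampIdx]
  rw [if_neg (by omega : ¬ xs.length ≤ 1), min_eq_left (by omega : 2 ≤ xs.length)]
  congr 1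
  omega

-- the body of one iteration of A's while loop (the three branches, in A's order)
def pvStep (nums : List Int) : List Int :=
  if nums.length = 2 then
    [PySem.List.pyGetD nums 0 0 + PySem.List.pyGetD nums 1 0]
  else if nums.length = 3 then
    [PySem.List.pyGetD nums 0 0 + PySem.List.pyGetD nums 1 0 + PySem.List.pyGetD nums 2 0]
  else
    [PySem.List.pyGetD nums 0 0 + PySem.List.pyGetD nums 1 0] ++
      PySem.List.slice nums (some 2) (some (-2)) ++
      [PySem.List.pyGetD nums (-2) 0 + PySem.List.pyGetD nums (-1) 0]

-- cited by pvLoop's decreasing_by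
theorem pvStep_length_lt (nums : List Int) (h : 1 < nums.length) :
    (pvStep nums).length < nums.length := by
  unfold pvStep
  split_ifs with h2 h3
  · simp [h2]
  · simp [h3]
  · rw [pvSlice2neg2 nums (by omega)]
    simp
    omega

-- A's while loop over the state (nums, ret)
def pvLoop (nums : List Int) (ret : List (List Int)) : List (List Int) :=
  if h : 1 < nums.length then pvLoop (pvStep nums) (ret ++ [pvStep nums])
  else ret
termination_by nums.length
decreasing_by exact pvStep_length_lt nums h

def method_name (nums : List Int) : List (List Int) := pvLoop nums [nums]

-- ===== PORT B =====
def method_name_alt (nums : List Int) : List (List Int) :=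
  let n : Int := nums.length
  let ret : List (List Int) := [nums]
  if n ≤ 1 then ret
  else
    let pre : List Int := nums.foldl (fun acc x => acc ++ [PySem.List.pyGetD acc (-1) 0 + x]) [0]
    let total : Int := PySem.List.pyGetD pre n 0
    let ret2 : List (List Int) :=
      (PySem.List.pyRange 1 (PySem.Int.floordiv (n - 2) 2 + 1) 1).foldl
        (fun r k =>
          r ++ [[PySem.List.pyGetD pre (k + 1) 0] ++
                PySem.List.slice nums (some (k + 1)) (some (n - k - 1)) ++
                [total - PySem.List.pyGetD pre (n - k - 1) 0]]) ret
    ret2 ++ [[total]]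

-- ===== PRECONDITION & SPEC =====
def Spec_method_name (nums : List Int) (out : List (List Int)) : Prop := out = method_name_alt nums
instance (nums : List Int) (out : List (List Int)) : Decidable (Spec_method_name nums out) := by unfold Spec_method_name; infer_instance

-- ===== CLAIM (what is proved, stated in full; the proofs are below) =====
def Claim_equal_method_name : Prop := ∀ (nums : List Int), Dom_method_name nums → Spec_method_name nums (method_name nums)

-- ===== LEMMAS AND PROOFS =====

-- xs[-1] and xs[-2] on explicit append shapes
theorem pvGetLast (xs : List Int) (x : Int) : PySem.List.pyGetD (xs ++ [x]) (-1) 0 = x := by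
  simp [PySem.List.pyGetD, PySem.List.pyGet?, PySem.List.pyIdx?]

theorem pvGetPenult (xs : List Int) (x y : Int) : PySem.List.pyGetD (xs ++ [x, y]) (-2) 0 = x := by
  simp [PySem.List.pyGetD, PySem.List.pyGet?, PySem.List.pyIdx?]

-- the closed-form stage k; stage 0 is nums itself when 2 ≤ nums.length
def pvStg (nums : List Int) (k : Nat) : List Int :=
  ((nums.take (k+1)).sum) ::
    ((nums.drop (k+1)).take (nums.length - (2*k+2)) ++ [(nums.drop (nums.length - (k+1))).sum])

theorem pvStg_length (nums : List Int) (k : Nat) (h : 2*k+2 ≤ nums.length) :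
    (pvStg nums k).length = nums.length - 2*k := by
  simp [pvStg]
  omega

theorem pvStg_zero (nums : List Int) (h : 2 ≤ nums.length) : pvStg nums 0 = nums := by
  match nums, h with
  | x :: t, h =>
    have ht : t ≠ [] := by intro e; subst e; simp at h
    simp [pvStg]
    rw [show t.length = (t.length - 1) + 1 by
      have := List.length_pos_iff.mpr ht; omega]
    rw [List.drop_succ_cons, List.drop_length_sub_one ht]
    simp [← List.dropLast_eq_take, List.dropLast_concat_getLast ht]

theorem pvSum_drop (l : List Int) (m : Nat) (h : m < l.length) :
    (l.drop m).sum = l[m] + (l.drop (m+1)).sum := by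
  rw [List.drop_eq_getElem_cons h, List.sum_cons]

-- one iteration of A's loop maps stage k to stage k+1 while at least 4 elements remain
theorem pvStep_stg (nums : List Int) (k : Nat) (h : 2*k + 4 ≤ nums.length) :
    pvStep (pvStg nums k) = pvStg nums (k+1) := by
  have hk1 : k+1 < nums.length := by omega
  have hc : nums.length-k-2 < nums.length := by omega
  have emid : (nums.drop (k+1)).take (nums.length - (2*k+2))
      = nums[k+1] :: ((nums.drop (k+2)).take (nums.length - (2*k+4)) ++ [nums[nums.length-k-2]]) := by
    rw [List.drop_eq_getElem_cons hk1,
      show nums.length - (2*k+2) = (nums.length - (2*k+3)) + 1 from by omega,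
      List.take_succ_cons,
      show nums.length-(2*k+3) = (nums.length-(2*k+4))+1 from by omega,
      List.take_add_one, List.getElem?_drop,
      show k+2 + (nums.length-(2*k+4)) = nums.length-k-2 from by omega,
      List.getElem?_eq_getElem hc]
    simp
  have hs : pvStg nums k
      = ((nums.take (k+1)).sum :: nums[k+1] :: (nums.drop (k+2)).take (nums.length - (2*k+4)))
        ++ [nums[nums.length-k-2], (nums.drop (nums.length - (k+1))).sum] := by
    rw [pvStg, emid]; simp
  have hlen : (pvStg nums k).length = nums.length - 2*k := pvStg_length nums k (by omega)
  rw [pvStep, hlen, if_neg (by omega), if_neg (by omega)]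
  rw [pvSlice2neg2 _ (by rw [hlen]; omega)]
  rw [hlen]
  rw [hs]
  rw [pvGetPenult, show ∀ y, (((nums.take (k+1)).sum :: nums[k+1] :: (nums.drop (k+2)).take (nums.length - (2*k+4))) ++ [nums[nums.length-k-2], y]) = ((((nums.take (k+1)).sum :: nums[k+1] :: (nums.drop (k+2)).take (nums.length - (2*k+4))) ++ [nums[nums.length-k-2]]) ++ [y]) from fun y => by simp, pvGetLast]
  have hm : (List.take (nums.length - (2*k+4)) (List.drop (k+2) nums)).length = nums.length - (2*k+4) := by simp; omega
  rw [PySem.List.pyGetD_of_nonneg _ _ (by norm_num), PySem.List.pyGetD_of_nonneg _ _ (by norm_num)]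
  simp only [Int.toNat_zero, Int.toNat_one, List.getD_cons_zero, List.getD_cons_succ,
    List.cons_append, List.drop_succ_cons, List.drop_zero, List.append_assoc]
  rw [show nums.length - 2*k - 4 = nums.length - (2*k+4) from by omega,
    List.take_append_of_le_length (by rw [hm]), List.take_take, min_self]
  rw [pvStg, ← List.sum_take_succ nums (k+1) hk1,
    show nums.length - (k+1+1) = nums.length-k-2 from by omega,
    pvSum_drop nums (nums.length-k-2) hc,
    show nums.length-k-2+1 = nums.length-(k+1) from by omega,
    show 2*(k+1)+2 = 2*k+4 from by omega]
  simp

-- the final collapse: from a stage of length 2 or 3 the loop body yields [sum nums]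
theorem pvStep_stg_last (nums : List Int) (k : Nat) (h2 : 2*k+2 ≤ nums.length)
    (h3 : nums.length ≤ 2*k+3) : pvStep (pvStg nums k) = [nums.sum] := by
  have hlen : (pvStg nums k).length = nums.length - 2*k := pvStg_length nums k h2
  rcases Nat.lt_or_ge nums.length (2*k+3) with hcase | hcase
  · have e0 : nums.length - (2*k+2) = 0 := by omega
    rw [pvStep, hlen, if_pos (by omega)]
    rw [pvStg, e0, List.take_zero, List.nil_append]
    rw [PySem.List.pyGetD_of_nonneg _ _ (by norm_num), PySem.List.pyGetD_of_nonneg _ _ (by norm_num)]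
    simp only [Int.toNat_zero, Int.toNat_one, List.getD_cons_zero, List.getD_cons_succ,
      List.getD_cons_zero]
    rw [show nums.length - (k+1) = k+1 from by omega, List.sum_take_add_sum_drop]
  · have e1 : nums.length - (2*k+2) = 1 := by omega
    have hk1 : k+1 < nums.length := by omega
    rw [pvStep, hlen, if_neg (by omega), if_pos (by omega)]
    rw [pvStg, e1, List.drop_eq_getElem_cons hk1, List.take_succ_cons, List.take_zero]
    rw [PySem.List.pyGetD_of_nonneg _ _ (by norm_num), PySem.List.pyGetD_of_nonneg _ _ (by norm_num),
      PySem.List.pyGetD_of_nonneg _ _ (by norm_num)]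
    simp only [Int.toNat_zero, Int.toNat_one, show Int.toNat 2 = 2 from rfl, List.cons_append,
      List.nil_append, List.getD_cons_zero, List.getD_cons_succ]
    rw [show nums.length - (k+1) = k+2 from by omega, add_assoc, ← List.sum_cons,
      ← List.drop_eq_getElem_cons hk1, List.sum_take_add_sum_drop]

-- A's loop from stage k emits exactly the j remaining formula stages and then [sum nums]
theorem pvLoop_stg (nums : List Int) (j : Nat) : ∀ (k : Nat) (ret : List (List Int)),
    2*k + 2*j + 2 ≤ nums.length → nums.length ≤ 2*k + 2*j + 3 →
    pvLoop (pvStg nums k) ret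
      = ret ++ (List.range j).map (fun i => pvStg nums (k+1+i)) ++ [[nums.sum]] := by
  induction j with
  | zero =>
    intro k ret h1 h2
    rw [pvLoop, dif_pos (by rw [pvStg_length nums k (by omega)]; omega)]
    rw [pvStep_stg_last nums k (by omega) (by omega)]
    rw [pvLoop, dif_neg (by simp)]
    simp
  | succ j ih =>
    intro k ret h1 h2
    rw [pvLoop, dif_pos (by rw [pvStg_length nums k (by omega)]; omega)]
    rw [pvStep_stg nums k (by omega)]
    rw [ih (k+1) (ret ++ [pvStg nums (k+1)]) (by omega) (by omega)]
    have hfun : (fun i => pvStg nums (k+1+1+i)) = ((fun i => pvStg nums (k+1+i)) ∘ Nat.succ) := by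
      funext i; simp only [Function.comp_apply]; congr 1; omega
    rw [List.range_succ_eq_map, List.map_cons, List.map_map, ← hfun]
    simp

theorem pvA_eq (nums : List Int) (h : 2 ≤ nums.length) :
    method_name nums
      = [nums] ++ (List.range ((nums.length - 2)/2)).map (fun i => pvStg nums (i+1))
          ++ [[nums.sum]] := by
  unfold method_name
  conv_lhs => rw [show nums = pvStg nums 0 from (pvStg_zero nums h).symm]
  rw [pvLoop_stg nums ((nums.length - 2)/2) 0 [pvStg nums 0] (by omega) (by omega)]
  rw [pvStg_zero nums h]
  congr 2
  exact congrFun (congrArg List.map (funext fun i => by congr 1; omega)) _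

-- B's hand-rolled prefix-sum loop computes the sums of the takes
theorem pvPre_fold (l : List Int) : ∀ (acc : List Int) (s : Int),
    PySem.List.pyGetD acc (-1) 0 = s →
    l.foldl (fun acc x => acc ++ [PySem.List.pyGetD acc (-1) 0 + x]) acc
      = acc ++ (List.range l.length).map (fun m => s + (l.take (m+1)).sum) := by
  induction l with
  | nil => intro acc s _; simp
  | cons x t ih =>
    intro acc s hs
    simp only [List.foldl_cons, hs]
    rw [ih (acc ++ [s + x]) (s + x) (pvGetLast acc (s + x))]
    rw [List.length_cons, List.range_succ_eq_map, List.map_cons, List.map_map]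
    simp only [List.take_succ_cons, List.sum_cons, List.append_assoc, List.cons_append,
      List.nil_append]
    congr 2
    · simp
    · exact congrFun (congrArg List.map (funext fun m => by simp [Function.comp]; ring)) _

theorem pvB_eq (nums : List Int) (h : 2 ≤ nums.length) :
    method_name_alt nums
      = [nums] ++ (List.range ((nums.length - 2)/2)).map (fun i => pvStg nums (i+1))
          ++ [[nums.sum]] := by
  have hpre : nums.foldl (fun acc x => acc ++ [PySem.List.pyGetD acc (-1) 0 + x]) [0]
      = (List.range (nums.length+1)).map (fun m => (nums.take m).sum) := by
    rw [pvPre_fold nums [0] 0 (by simp [PySem.List.pyGetD, PySem.List.pyGet?, PySem.List.pyIdx?])]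
    rw [List.range_succ_eq_map, List.map_cons, List.map_map]
    simp [Function.comp]
  have htot : PySem.List.pyGetD ((List.range (nums.length+1)).map (fun m => (nums.take m).sum))
      ((nums.length : Int)) 0 = nums.sum := by
    rw [PySem.List.pyGetD_natCast, PySem.List.getD_map_range _ _ _ _ (by omega), List.take_length]
  have hfd : PySem.Int.floordiv ((nums.length:Int) - 2) 2 = (((nums.length - 2)/2 : Nat) : Int) := by
    rw [PySem.Int.floordiv_eq_ediv_of_pos (by norm_num)]
    omega
  simp only [method_name_alt, hpre, htot, hfd]
  rw [if_neg (by omega), PySem.List.pyRange_one]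
  rw [show ((((nums.length - 2)/2 : Nat) : Int) + 1 - 1).toNat = (nums.length - 2)/2 by omega]
  rw [PySem.List.foldl_append_singleton_eq_map, List.map_map]
  congr 1
  congr 1
  apply List.map_congr_left
  intro i hi
  have hij : i < (nums.length - 2)/2 := List.mem_range.mp hi
  have hb : 2*i + 4 ≤ nums.length := by omega
  simp only [Function.comp_apply]
  rw [show (1 + (i:Int) + 1) = (((i+2 : Nat)) : Int) from by push_cast; ring,
    PySem.List.pyGetD_natCast, PySem.List.getD_map_range _ _ _ _ (by omega)]
  rw [show ((nums.length : Int) - (1 + (i:Int)) - 1) = (((nums.length - (i+2) : Nat)) : Int) from by omega,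
    PySem.List.pyGetD_natCast, PySem.List.getD_map_range _ _ _ _ (by omega)]
  rw [PySem.List.slice_natCast]
  have hdrop : nums.sum - (nums.take (nums.length - (i+2))).sum
      = (nums.drop (nums.length - (i+2))).sum := by
    have := List.sum_take_add_sum_drop nums (nums.length - (i+2))
    omega
  rw [hdrop, pvStg,
    show i+1+1 = i+2 from rfl,
    show nums.length - (2*(i+1)+2) = (nums.length - (i+2)) - (i+2) from by omega,
    show nums.length - (i+1+1) = nums.length - (i+2) from rfl]
  simp

-- ===== VERDICT (by name: the statement is the Claim_ definition above) =====
theorem method_name_spec : Claim_equal_method_name := by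
  intro nums _
  unfold Spec_method_name
  by_cases h : 2 ≤ nums.length
  · rw [pvA_eq nums h, pvB_eq nums h]
  · have h1 : ¬ 1 < nums.length := by omega
    unfold method_name
    rw [pvLoop, dif_neg h1]
    unfold method_name_alt
    rw [if_pos (by simp; omega)]
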